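-- pv_equiv track=rewrite | github.com/pcwmi/style-inspo-api | backend/tests/outfit_eval/scripts/generate_eval_html.py | detect_eval_type
-- ===== SOURCE A (Python) =====
-- def detect_eval_type(results):
--     """Detect if this is A/B test (multiple models/prompts per scenario) or single model"""
--     scenario_models = {}
--     for r in results:
--         scenario_id = r['scenario_id']
--         model_id = r['model_id']
--         if scenario_id not in scenario_models:
--             scenario_models[scenario_id] = set()
--         scenario_models[scenario_id].add(model_id)
--
--     # If any scenario has multiple models, it's an A/B test
--     is_ab_test = any(len(models) > 1 for models in scenario_models.values())
--     return 'ab_test' if is_ab_test else 'single_model'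
-- ===== SOURCE B (Python) =====
-- def detect_eval_type(results):
--     """Detect if this is A/B test (multiple models/prompts per scenario) or single model"""
--     scenarios = set()
--     pairs = set()
--     for r in results:
--         scenario_id = r['scenario_id']
--         model_id = r['model_id']
--         scenarios.add(scenario_id)
--         pairs.add((scenario_id, model_id))
--     # some scenario has more than one model exactly when there are
--     # more distinct (scenario, model) pairs than distinct scenarios
--     return 'ab_test' if len(pairs) > len(scenarios) else 'single_model'
-- ===== Notes on version B (the rewrite author's own statement) =====
-- stated objective: simpler
-- what changed: Replaces the group-into-dict-of-sets-then-scan-groups strategy with a single pass that accumulates the set of scenarios and the set of (scenario, model) pairs and compares their cardinalities: distinct pairs exceed distinct scenarios exactly when some scenario has several models.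
import Mathlib
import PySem

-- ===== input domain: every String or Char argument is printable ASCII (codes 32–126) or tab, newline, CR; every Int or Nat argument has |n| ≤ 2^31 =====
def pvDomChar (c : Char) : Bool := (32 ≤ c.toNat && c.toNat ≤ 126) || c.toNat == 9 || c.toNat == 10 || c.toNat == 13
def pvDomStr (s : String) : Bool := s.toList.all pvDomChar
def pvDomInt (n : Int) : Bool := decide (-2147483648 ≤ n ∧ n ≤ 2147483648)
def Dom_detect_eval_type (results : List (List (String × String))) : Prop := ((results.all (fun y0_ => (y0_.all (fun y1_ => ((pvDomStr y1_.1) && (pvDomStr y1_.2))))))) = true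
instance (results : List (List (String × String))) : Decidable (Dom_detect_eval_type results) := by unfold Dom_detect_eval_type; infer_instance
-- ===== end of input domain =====

-- B replaces A's dict-of-sets grouping with one pass building the scenario set and the
-- (scenario, model) pair set and comparing their cardinalities; objective: simpler, same cost.


-- r['k'] on the association-list encoding of a Python dict: first matching value
-- (total form; Pre_ guarantees the key is present, so the default is never the value used)
def pvItem (r : List (String × String)) (k : String) : String :=
  ((r.find? (fun p => p.1 == k)).map (fun p => p.2)).getD ""

-- ===== PORT A =====
def detect_eval_type (results : List (List (String × String))) : String :=
  let scenario_models : PySem.Dict String (PySem.Set String) :=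
    results.foldl (fun d r =>
      let scenario_id := pvItem r "scenario_id"
      let model_id := pvItem r "model_id"
      let d := if d.contains scenario_id then d
               else d.insert scenario_id (PySem.Set.ofList [])
      d.modify scenario_id (PySem.Set.ofList []) (fun ms => PySem.Set.add ms model_id))
      PySem.Dict.empty
  let is_ab_test := scenario_models.values.any (fun models => decide (1 < models.length))
  if is_ab_test then "ab_test" else "single_model"

-- ===== PORT B =====
def detect_eval_type_alt (results : List (List (String × String))) : String :=
  let st := results.foldl
      (fun (st : PySem.Set String × PySem.Set (String × String)) r =>
        let scenario_id := pvItem r "scenario_id"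
        let model_id := pvItem r "model_id"
        (st.1.add scenario_id, st.2.add (scenario_id, model_id)))
      (PySem.Set.ofList [], PySem.Set.ofList [])
  if st.2.length > st.1.length then "ab_test" else "single_model"

-- ===== PRECONDITION & SPEC =====
-- Pre_ excludes exactly the inputs where some record lacks the key 'scenario_id' or
-- 'model_id': there the Python A (and B) raises KeyError.
def Pre_detect_eval_type (results : List (List (String × String))) : Prop :=
  ∀ r ∈ results, (r.any (fun p => p.1 == "scenario_id")) = true ∧
                 (r.any (fun p => p.1 == "model_id")) = true
instance (results : List (List (String × String))) : Decidable (Pre_detect_eval_type results) := by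
  unfold Pre_detect_eval_type; infer_instance

def pvWitness_detect_eval_type : (List (List (String × String))) :=
  [[("scenario_id", "s1"), ("model_id", "m1")], [("scenario_id", "s1"), ("model_id", "m2")]]

def Spec_detect_eval_type (results : List (List (String × String))) (out : String) : Prop := out = detect_eval_type_alt results
instance (results : List (List (String × String))) (out : String) : Decidable (Spec_detect_eval_type results out) := by unfold Spec_detect_eval_type; infer_instance

-- ===== CLAIM (what is proved, stated in full; the proofs are below) =====
def Claim_equal_detect_eval_type : Prop := ∀ (results : List (List (String × String))), Dom_detect_eval_type results → Pre_detect_eval_type results → Spec_detect_eval_type results (detect_eval_type results)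

-- ===== LEMMAS AND PROOFS =====

-- the (scenario_id, model_id) pair a record contributes
def pvKey (r : List (String × String)) : String × String :=
  (pvItem r "scenario_id", pvItem r "model_id")

-- A's loop body / B's loop body, as functions of the pair
def stepA (d : PySem.Dict String (PySem.Set String)) (p : String × String) :
    PySem.Dict String (PySem.Set String) :=
  let d := if d.contains p.1 then d else d.insert p.1 (PySem.Set.ofList [])
  d.modify p.1 (PySem.Set.ofList []) (fun ms => PySem.Set.add ms p.2)

def stepB (st : PySem.Set String × PySem.Set (String × String)) (p : String × String) :
    PySem.Set String × PySem.Set (String × String) :=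
  (st.1.add p.1, st.2.add p)

-- the coupling invariant between A's dict of sets and B's two sets
def CoupleInv (d : PySem.Dict String (PySem.Set String))
    (S : PySem.Set String) (P : PySem.Set (String × String)) : Prop :=
  d.keys.Nodup ∧ S = d.keys ∧
  (∀ a b, (a, b) ∈ P ↔ d.contains a = true ∧ b ∈ d.getD a []) ∧
  (∀ k ∈ d.keys, (d.getD k []).Nodup ∧ d.getD k [] ≠ []) ∧
  P.length = (d.keys.map (fun k => (d.getD k []).length)).sum

lemma set_add_of_mem {α : Type} [BEq α] [LawfulBEq α] (s : PySem.Set α) (x : α)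
    (h : x ∈ s) : s.add x = s := by
  simp [PySem.Set.add, h]

lemma set_add_of_not_mem {α : Type} [BEq α] [LawfulBEq α] (s : PySem.Set α) (x : α)
    (h : x ∉ s) : s.add x = s ++ [x] := by
  simp [PySem.Set.add]
  intro h'; exact absurd h' h

lemma sum_map_update_mem (ls : List String) (f g : String → Nat) (s : String)
    (h : s ∈ ls) (hn : ls.Nodup) (hfg : ∀ k ∈ ls, k ≠ s → g k = f k) (hs : g s = f s + 1) :
    (ls.map g).sum = (ls.map f).sum + 1 := by
  induction ls with
  | nil => cases h
  | cons x t ih =>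
    rcases List.nodup_cons.mp hn with ⟨hx, hnt⟩
    rcases List.mem_cons.mp h with rfl | hmem
    · have : t.map g = t.map f := List.map_congr_left (fun k hk =>
        hfg k (List.mem_cons_of_mem _ hk) (fun hks => hx (hks ▸ hk)))
      simp [this, hs]; omega
    · have hxs : x ≠ s := fun hxs => hx (hxs ▸ hmem)
      have := ih hmem hnt (fun k hk => hfg k (List.mem_cons_of_mem _ hk))
      simp [hfg x (List.mem_cons_self) hxs, this]; omega

lemma contains_false_of_not {d : PySem.Dict String (PySem.Set String)} {s : String}
    (hc : ¬ d.contains s = true) : d.contains s = false := by simpa using hc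

-- A's two statements on a record collapse to one insert of an updated set
lemma stepA_eq (d : PySem.Dict String (PySem.Set String)) (s m : String) :
    stepA d (s, m) = d.insert s ((d.getD s []).add m) := by
  by_cases hc : d.contains s = true
  · simp only [stepA, if_pos hc]; rfl
  · simp only [stepA, if_neg hc]
    show (d.insert s (PySem.Set.ofList [])).insert s
        (((d.insert s (PySem.Set.ofList [])).getD s (PySem.Set.ofList [])).add m) = _
    rw [PySem.Dict.insert_insert_self, PySem.Dict.getD_insert_self,
      PySem.Dict.getD_of_not_contains d ([] : PySem.Set String) (contains_false_of_not hc)]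
    rfl

lemma length_le_sum_map (ls : List String) (f : String → Nat) (h : ∀ k ∈ ls, 1 ≤ f k) :
    ls.length ≤ (ls.map f).sum := by
  induction ls with
  | nil => simp
  | cons x t ih =>
    have := ih (fun k hk => h k (List.mem_cons_of_mem _ hk))
    have := h x List.mem_cons_self
    simp only [List.length_cons, List.map_cons, List.sum_cons]
    omega

lemma any_lt_iff_length_lt_sum (ls : List String) (f : String → Nat)
    (h : ∀ k ∈ ls, 1 ≤ f k) :
    ((ls.any (fun k => decide (1 < f k))) = true ↔ ls.length < (ls.map f).sum) := by
  induction ls with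
  | nil => simp
  | cons x t ih =>
    have hih := ih (fun k hk => h k (List.mem_cons_of_mem _ hk))
    have h1 := h x List.mem_cons_self
    have h2 := length_le_sum_map t f (fun k hk => h k (List.mem_cons_of_mem _ hk))
    simp only [List.any_cons, List.length_cons, List.map_cons, List.sum_cons,
      Bool.or_eq_true, decide_eq_true_eq, hih]
    omega

lemma inv_step (d : PySem.Dict String (PySem.Set String))
    (S : PySem.Set String) (P : PySem.Set (String × String)) (p : String × String)
    (h : CoupleInv d S P) : CoupleInv (stepA d p) (stepB (S, P) p).1 (stepB (S, P) p).2 := by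
  obtain ⟨h1, h2, h3, h4, h5⟩ := h
  obtain ⟨s, m⟩ := p
  rw [stepA_eq]
  simp only [stepB]
  set v : PySem.Set String := (d.getD s []).add m with hv
  have hgetD : ∀ a : String, (d.insert s v).getD a [] = if a = s then v else d.getD a [] :=
    fun a => PySem.Dict.getD_insert d s a v []
  have hcont : ∀ a : String, (d.insert s v).contains a = (a == s || d.contains a) :=
    fun a => PySem.Dict.contains_insert d s a v
  refine ⟨PySem.Dict.nodup_keys_insert d s v h1, ?_, ?_, ?_, ?_⟩
  · -- S.add s = keys of the new dict
    by_cases hc : d.contains s = true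
    · have hsmem : s ∈ d.keys := by
        simpa [PySem.Dict.contains_eq_decide_mem_keys] using hc
      rw [PySem.Dict.keys_insert_of_contains d v hc, ← h2,
        set_add_of_mem S s (h2 ▸ hsmem)]
    · have hsnot : s ∉ d.keys := by
        simpa [PySem.Dict.contains_eq_decide_mem_keys] using hc
      rw [PySem.Dict.keys_insert_of_not_contains d v (contains_false_of_not hc), ← h2,
        set_add_of_not_mem S s (h2 ▸ hsnot)]
  · -- membership of the pair set describes the dict
    intro a b
    rw [PySem.Set.mem_add, hgetD, hcont]
    by_cases ha : a = s
    · subst ha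
      by_cases hc : d.contains a = true
      · simp [hv, PySem.Set.mem_add, h3 a b, hc]
      · have h0 : d.getD a [] = [] :=
          PySem.Dict.getD_of_not_contains d ([] : PySem.Set String) (contains_false_of_not hc)
        simp [hv, h0, PySem.Set.add, h3 a b, hc]
    · have hne : (a, b) ≠ (s, m) := fun hpe => ha (congrArg Prod.fst hpe)
      simp only [if_neg ha, beq_eq_false_iff_ne.mpr ha, Bool.false_or, h3 a b, hne, or_false]
  · -- every stored set is still a nonempty set without duplicates
    intro k hk
    rw [hgetD]
    by_cases hks : k = s
    · subst hks
      have hnd : (d.getD k []).Nodup := by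
        by_cases hc : d.contains k = true
        · exact (h4 k (by simpa [PySem.Dict.contains_eq_decide_mem_keys] using hc)).1
        · rw [PySem.Dict.getD_of_not_contains d ([] : PySem.Set String) (contains_false_of_not hc)]; simp
      refine ⟨by simpa [hv] using PySem.Set.nodup_add _ _ hnd, ?_⟩
      rw [if_pos rfl, hv]
      exact List.ne_nil_of_mem ((PySem.Set.mem_add _ m m).mpr (Or.inr rfl))
    · rw [if_neg hks]
      refine h4 k ?_
      by_cases hc : d.contains s = true
      · rwa [PySem.Dict.keys_insert_of_contains d v hc] at hk
      · rw [PySem.Dict.keys_insert_of_not_contains d v (contains_false_of_not hc)] at hk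
        rcases List.mem_append.mp hk with h' | h'
        · exact h'
        · exact absurd (List.mem_singleton.mp h') hks
  · -- the pair count equals the total size of the stored sets
    by_cases hin : (s, m) ∈ P
    · rw [set_add_of_mem P (s, m) hin]
      obtain ⟨hc, hm⟩ := (h3 s m).mp hin
      have hvv : v = d.getD s [] := set_add_of_mem _ m hm
      have hkeys : (d.insert s v).keys = d.keys := PySem.Dict.keys_insert_of_contains d v hc
      rw [hkeys, h5]
      congr 1
      refine List.map_congr_left (fun k _ => ?_)
      rw [hgetD]
      by_cases hks : k = s
      · subst hks; rw [if_pos rfl, hvv]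
      · rw [if_neg hks]
    · rw [set_add_of_not_mem P (s, m) hin, List.length_append, List.length_singleton, h5]
      by_cases hc : d.contains s = true
      · have hsmem : s ∈ d.keys := by
          simpa [PySem.Dict.contains_eq_decide_mem_keys] using hc
        have hm : m ∉ d.getD s [] := fun hm => hin ((h3 s m).mpr ⟨hc, hm⟩)
        rw [PySem.Dict.keys_insert_of_contains d v hc]
        refine (sum_map_update_mem d.keys _ _ s hsmem h1 (fun k _ hks => ?_) ?_).symm
        · rw [hgetD, if_neg hks]
        · rw [hgetD, if_pos rfl, hv, set_add_of_not_mem _ m hm]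
          simp
      · have hsnot : s ∉ d.keys := by
          simpa [PySem.Dict.contains_eq_decide_mem_keys] using hc
        have h0 : d.getD s [] = [] :=
          PySem.Dict.getD_of_not_contains d ([] : PySem.Set String) (contains_false_of_not hc)
        rw [PySem.Dict.keys_insert_of_not_contains d v (contains_false_of_not hc),
          List.map_append, List.sum_append]
        have hmap : d.keys.map (fun k => ((d.insert s v).getD k []).length) =
            d.keys.map (fun k => (d.getD k []).length) :=
          List.map_congr_left (fun k hk => by
            have hks : k ≠ s := fun hks => hsnot (hks ▸ hk)
            rw [hgetD, if_neg hks])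
        rw [hmap]
        simp [hv, h0]

lemma inv_final (d : PySem.Dict String (PySem.Set String))
    (S : PySem.Set String) (P : PySem.Set (String × String)) (h : CoupleInv d S P) :
    (d.values.any (fun models => decide (1 < models.length)) = true ↔ S.length < P.length) := by
  obtain ⟨h1, h2, h3, h4, h5⟩ := h
  rw [PySem.Dict.values_eq_map_keys d h1 [], List.any_map, h2, h5]
  exact any_lt_iff_length_lt_sum d.keys (fun k => (d.getD k []).length)
    (fun k hk => List.length_pos_iff.mpr (h4 k hk).2)

lemma inv_foldl (ps : List (String × String)) (d : PySem.Dict String (PySem.Set String))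
    (S : PySem.Set String) (P : PySem.Set (String × String)) (h : CoupleInv d S P) :
    CoupleInv (ps.foldl stepA d) (ps.foldl stepB (S, P)).1 (ps.foldl stepB (S, P)).2 := by
  induction ps generalizing d S P with
  | nil => exact h
  | cons p t ih =>
    have := inv_step d S P p h
    simpa [List.foldl_cons] using ih _ _ _ this

lemma inv_init : CoupleInv PySem.Dict.empty (PySem.Set.ofList []) (PySem.Set.ofList []) := by
  refine ⟨by simp [PySem.Dict.empty, PySem.Dict.keys], rfl, ?_, ?_, ?_⟩ <;>
    simp [PySem.Set.ofList, PySem.Dict.empty, PySem.Dict.keys, PySem.Dict.contains]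

-- ===== VERDICT (by name: the statement is the Claim_ definition above) =====
theorem detect_eval_type_spec : Claim_equal_detect_eval_type := by
  intro results _ _
  show _ = _
  unfold detect_eval_type detect_eval_type_alt
  have hA : (results.foldl (fun d r =>
      let scenario_id := pvItem r "scenario_id"
      let model_id := pvItem r "model_id"
      let d := if d.contains scenario_id then d
               else d.insert scenario_id (PySem.Set.ofList [])
      d.modify scenario_id (PySem.Set.ofList []) (fun ms => PySem.Set.add ms model_id))
      PySem.Dict.empty) = (results.map pvKey).foldl stepA PySem.Dict.empty := by
    rw [List.foldl_map]; rfl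
  have hB : (results.foldl
      (fun (st : PySem.Set String × PySem.Set (String × String)) r =>
        let scenario_id := pvItem r "scenario_id"
        let model_id := pvItem r "model_id"
        (st.1.add scenario_id, st.2.add (scenario_id, model_id)))
      (PySem.Set.ofList [], PySem.Set.ofList [])) =
      (results.map pvKey).foldl stepB (PySem.Set.ofList [], PySem.Set.ofList []) := by
    rw [List.foldl_map]; rfl
  simp only [hA, hB]
  have hinv := inv_foldl (results.map pvKey) _ _ _ inv_init
  have hiff := inv_final _ _ _ hinv
  by_cases hab : ((results.map pvKey).foldl stepA PySem.Dict.empty).values.any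
      (fun models => decide (1 < models.length)) = true
  · rw [if_pos hab, if_pos (hiff.mp hab)]
  · rw [if_neg hab, if_neg (fun hc => hab (hiff.mpr hc))]
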